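-- pv_equiv track=rewrite | github.com/abinit/abinit | doc/pymods/lib_to_assemble_html.py | reformat_namelist
-- ===== SOURCE A (Python) =====
-- def reformat_namelist(namelist):
--   """ Change the usual bibtex Lastname1, Firstname1 and Lastname2, Firstname2 and ...
--       to the Phys. Rev. B style list of names.
--   """
--   flag_editor=0
--   newnamelist=namelist
--   # Very crude treatment of the appearance of the "(Eds.)" string...
--   if '(Eds.)' in namelist:
--     newnamelist=newnamelist.split('(Eds.)')[0]
--     flag_editor=1
--   new_name=""
--   names=newnamelist.split(' and ')
--   numnames=len(names)
--   for (i,one_name) in enumerate(names):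
--     if ',' in one_name:
--       name_initials = one_name.split(',',1)
--       new_name+= name_initials[1].strip()+" "+name_initials[0].strip()
--     else:
--       new_name+=one_name.strip()
--     if i==len(names)-2:
--       new_name+=" and "
--     elif i==len(names)-1:
--       if flag_editor==1:
--         new_name+=" (Eds.)"
--     else:
--       new_name+=", "
--   newnamelist=new_name+","
--   return newnamelist
-- ===== SOURCE B (Python) =====
-- def reformat_namelist(namelist):
--   flag_editor = '(Eds.)' in namelist
--   if flag_editor:
--     namelist = namelist.split('(Eds.)')[0]
--   suffix = ' (Eds.)' if flag_editor else ''
--   def rec(names):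
--     name = names[0]
--     if ',' in name:
--       last, first = name.split(',', 1)
--       name = first.strip() + ' ' + last.strip()
--     else:
--       name = name.strip()
--     rest = names[1:]
--     if not rest:
--       return name + suffix
--     sep = ' and ' if len(rest) == 1 else ', '
--     return name + sep + rec(rest)
--   return rec(namelist.split(' and ')) + ','
-- ===== Notes on version B (the rewrite author's own statement) =====
-- stated objective: alternative
-- what changed: B replaces A's indexed accumulating loop (which picks each separator by comparing the running enumerate index against the list length) with a structural recursion over the name list that builds the string back-to-front: the separator and the editor suffix are decided purely from the shape of the remaining suffix of the list, with no indices, no length-vs-index comparisons and no accumulator.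
import Mathlib
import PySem

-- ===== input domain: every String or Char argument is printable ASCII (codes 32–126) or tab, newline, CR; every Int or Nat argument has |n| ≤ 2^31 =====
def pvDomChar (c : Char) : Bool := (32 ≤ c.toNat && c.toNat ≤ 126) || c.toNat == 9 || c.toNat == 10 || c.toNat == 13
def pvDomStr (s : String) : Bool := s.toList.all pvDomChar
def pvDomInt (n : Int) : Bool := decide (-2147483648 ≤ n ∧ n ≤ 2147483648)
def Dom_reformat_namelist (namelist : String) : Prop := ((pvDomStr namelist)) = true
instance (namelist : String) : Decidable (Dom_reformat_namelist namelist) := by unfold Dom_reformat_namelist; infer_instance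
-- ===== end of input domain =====

-- B rebuilds the result by structural recursion on the name list (separator chosen from the shape
-- of the remaining suffix, string built back-to-front) instead of A's indexed accumulating loop.

-- ===== PORT A =====
def reformat_namelist (namelist : String) : String :=
  let flag_editor : Int := if PySem.Str.isIn "(Eds.)" namelist then 1 else 0
  let newnamelist : String :=
    if PySem.Str.isIn "(Eds.)" namelist then
      ((PySem.Str.split? namelist "(Eds.)").getD []).headD ""
    else namelist
  let names := (PySem.Str.split? newnamelist " and ").getD []
  let new_name := (PySem.List.enumerate names).foldl
    (fun new_name p =>
      let new_name :=
        if PySem.Str.isIn "," p.2 then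
          let name_initials := (PySem.Str.splitMax? p.2 "," 1).getD []
          new_name ++ PySem.Str.strip (name_initials.getD 1 "") ++ " " ++
            PySem.Str.strip (name_initials.getD 0 "")
        else new_name ++ PySem.Str.strip p.2
      if p.1 = (names.length : Int) - 2 then new_name ++ " and "
      else if p.1 = (names.length : Int) - 1 then
        (if flag_editor = 1 then new_name ++ " (Eds.)" else new_name)
      else new_name ++ ", ") ""
  new_name ++ ","

-- ===== PORT B =====
-- Python's inner `rec` raises on an empty list; it is never called on one (str.split is never
-- empty), so the [] branch's "" is unreachable.
def pvRec (suffix : String) : List String → String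
  | [] => ""
  | name :: rest =>
    let nm :=
      if PySem.Str.isIn "," name then
        let parts := (PySem.Str.splitMax? name "," 1).getD []
        PySem.Str.strip (parts.getD 1 "") ++ " " ++ PySem.Str.strip (parts.getD 0 "")
      else PySem.Str.strip name
    if rest.isEmpty then nm ++ suffix
    else nm ++ (if rest.length = 1 then " and " else ", ") ++ pvRec suffix rest

def reformat_namelist_alt (namelist : String) : String :=
  let flag_editor := PySem.Str.isIn "(Eds.)" namelist
  let base :=
    if flag_editor then ((PySem.Str.split? namelist "(Eds.)").getD []).headD ""
    else namelist
  let suffix := if flag_editor then " (Eds.)" else ""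
  pvRec suffix ((PySem.Str.split? base " and ").getD []) ++ ","

-- ===== PRECONDITION & SPEC =====
def Spec_reformat_namelist (namelist : String) (out : String) : Prop := out = reformat_namelist_alt namelist
instance (namelist : String) (out : String) : Decidable (Spec_reformat_namelist namelist out) := by unfold Spec_reformat_namelist; infer_instance

-- ===== CLAIM (what is proved, stated in full; the proofs are below) =====
def Claim_equal_reformat_namelist : Prop := ∀ (namelist : String), Dom_reformat_namelist namelist → Spec_reformat_namelist namelist (reformat_namelist namelist)

-- ===== LEMMAS AND PROOFS =====

-- the " (Eds.)" suffix as a function of A's integer flag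
def pvEds (fi : Int) : String := if fi = 1 then " (Eds.)" else ""

-- the per-name flip, as it appears inside both ports
def pvFlip (one_name : String) : String :=
  if PySem.Str.isIn "," one_name then
    let parts := (PySem.Str.splitMax? one_name "," 1).getD []
    PySem.Str.strip (parts.getD 1 "") ++ " " ++ PySem.Str.strip (parts.getD 0 "")
  else PySem.Str.strip one_name

-- the string both programs produce for an (already flipped) suffix of the name list
def pvTail (fi : Int) : List String → String
  | [] => ""
  | [x] => x ++ pvEds fi
  | x :: y :: ys => x ++ (if ys.isEmpty then " and " else ", ") ++ pvTail fi (y :: ys)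

theorem pvGo_ne_nil (sep : List Char) :
    ∀ (fuel : Nat) (l cur : List Char) (acc : List (List Char)),
      PySem.Chars.splitOn.go sep fuel l cur acc ≠ [] := by
  intro fuel
  induction fuel with
  | zero => intro l cur acc; simp [PySem.Chars.splitOn.go]
  | succ n ih =>
    intro l cur acc
    cases l with
    | nil => simp [PySem.Chars.splitOn.go]
    | cons c rest =>
      rw [PySem.Chars.splitOn.go]
      split
      · exact ih _ _ _
      · exact ih _ _ _

theorem pvSplit_ne_nil (s sep : String) (h : sep.toList ≠ []) :
    (PySem.Str.split? s sep).getD [] ≠ [] := by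
  simp only [PySem.Str.split?, PySem.Chars.split?, List.isEmpty_iff, if_neg h,
    Option.map_some, Option.getD_some, PySem.Chars.splitOn]
  intro hmap
  exact pvGo_ne_nil _ _ _ _ _ (List.map_eq_nil_iff.mp hmap)

theorem pvA_loop (fi n : Int) :
    ∀ (xs : List String) (s : Int) (acc : String), xs ≠ [] → s + (xs.length : Int) = n →
    (PySem.List.enumerate xs s).foldl
      (fun new_name p =>
        let new_name :=
          if PySem.Str.isIn "," p.2 then
            let name_initials := (PySem.Str.splitMax? p.2 "," 1).getD []
            new_name ++ PySem.Str.strip (name_initials.getD 1 "") ++ " " ++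
              PySem.Str.strip (name_initials.getD 0 "")
          else new_name ++ PySem.Str.strip p.2
        if p.1 = n - 2 then new_name ++ " and "
        else if p.1 = n - 1 then
          (if fi = 1 then new_name ++ " (Eds.)" else new_name)
        else new_name ++ ", ") acc
    = acc ++ pvTail fi (xs.map pvFlip) := by
  intro xs
  induction xs with
  | nil => intro s acc h _; exact absurd rfl h
  | cons x xs ih =>
    intro s acc _ hn
    simp only [List.length_cons] at hn
    push_cast at hn
    rw [PySem.List.enumerate_cons, List.foldl_cons]
    have hflip : ∀ (a : String),
        (if PySem.Str.isIn "," x then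
            let name_initials := (PySem.Str.splitMax? x "," 1).getD []
            a ++ PySem.Str.strip (name_initials.getD 1 "") ++ " " ++
              PySem.Str.strip (name_initials.getD 0 "")
          else a ++ PySem.Str.strip x) = a ++ pvFlip x := by
      intro a; unfold pvFlip
      cases PySem.Str.isIn "," x <;> simp [String.append_assoc]
    cases xs with
    | nil =>
      rw [PySem.List.enumerate_nil, List.foldl_nil]
      simp only [List.length_nil, Nat.cast_zero] at hn
      have h2 : ¬ (s = n - 2) := by omega
      have h1 : s = n - 1 := by omega
      simp only [hflip, h1, List.map, pvTail]
      by_cases hf : fi = 1 <;> simp [hf, pvEds, String.append_assoc]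
    | cons y ys =>
      rw [ih (s + 1) _ (by simp)
        (by simp only [List.length_cons] at hn ⊢; push_cast at hn ⊢; omega)]
      simp only [hflip]
      by_cases hys : ys = []
      · subst hys
        have h2 : s = n - 2 := by simp at hn; omega
        simp [h2, pvTail, pvEds, String.append_assoc]
      · have hpos : 0 < ys.length := List.length_pos_of_ne_nil hys
        have h2 : ¬ (s = n - 2) := by simp at hn; omega
        have h1 : ¬ (s = n - 1) := by simp at hn; omega
        have hmap : ((ys.map pvFlip).isEmpty) = false := by
          simp [hys]
        simp [h2, h1, pvTail, hmap, String.append_assoc]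

theorem pvA_loop1 (n : Int) :
    ∀ (xs : List String) (s : Int) (acc : String), xs ≠ [] → s + (xs.length : Int) = n →
    (PySem.List.enumerate xs s).foldl
      (fun new_name p =>
        if p.1 = n - 2 then
          (if PySem.Str.isIn "," p.2 then
              new_name ++ PySem.Str.strip (((PySem.Str.splitMax? p.2 "," 1).getD []).getD 1 "") ++ " " ++
                PySem.Str.strip (((PySem.Str.splitMax? p.2 "," 1).getD []).getD 0 "")
            else new_name ++ PySem.Str.strip p.2) ++ " and "
        else if p.1 = n - 1 then
          (if PySem.Str.isIn "," p.2 then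
              new_name ++ PySem.Str.strip (((PySem.Str.splitMax? p.2 "," 1).getD []).getD 1 "") ++ " " ++
                PySem.Str.strip (((PySem.Str.splitMax? p.2 "," 1).getD []).getD 0 "")
            else new_name ++ PySem.Str.strip p.2) ++ " (Eds.)"
        else
          (if PySem.Str.isIn "," p.2 then
              new_name ++ PySem.Str.strip (((PySem.Str.splitMax? p.2 "," 1).getD []).getD 1 "") ++ " " ++
                PySem.Str.strip (((PySem.Str.splitMax? p.2 "," 1).getD []).getD 0 "")
            else new_name ++ PySem.Str.strip p.2) ++ ", ") acc
    = acc ++ pvTail 1 (xs.map pvFlip) := by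
  intro xs s acc h1 h2
  have hfun : (fun (new_name : String) (p : Int × String) =>
        if p.1 = n - 2 then
          (if PySem.Str.isIn "," p.2 then
              new_name ++ PySem.Str.strip (((PySem.Str.splitMax? p.2 "," 1).getD []).getD 1 "") ++ " " ++
                PySem.Str.strip (((PySem.Str.splitMax? p.2 "," 1).getD []).getD 0 "")
            else new_name ++ PySem.Str.strip p.2) ++ " and "
        else if p.1 = n - 1 then
          (if PySem.Str.isIn "," p.2 then
              new_name ++ PySem.Str.strip (((PySem.Str.splitMax? p.2 "," 1).getD []).getD 1 "") ++ " " ++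
                PySem.Str.strip (((PySem.Str.splitMax? p.2 "," 1).getD []).getD 0 "")
            else new_name ++ PySem.Str.strip p.2) ++ " (Eds.)"
        else
          (if PySem.Str.isIn "," p.2 then
              new_name ++ PySem.Str.strip (((PySem.Str.splitMax? p.2 "," 1).getD []).getD 1 "") ++ " " ++
                PySem.Str.strip (((PySem.Str.splitMax? p.2 "," 1).getD []).getD 0 "")
            else new_name ++ PySem.Str.strip p.2) ++ ", ")
      = (fun (new_name : String) (p : Int × String) =>
        let new_name :=
          if PySem.Str.isIn "," p.2 then
            let name_initials := (PySem.Str.splitMax? p.2 "," 1).getD []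
            new_name ++ PySem.Str.strip (name_initials.getD 1 "") ++ " " ++
              PySem.Str.strip (name_initials.getD 0 "")
          else new_name ++ PySem.Str.strip p.2
        if p.1 = n - 2 then new_name ++ " and "
        else if p.1 = n - 1 then
          (if (1 : Int) = 1 then new_name ++ " (Eds.)" else new_name)
        else new_name ++ ", ") := by
    funext a p
    by_cases hc : PySem.Str.isIn "," p.2 = true <;> simp
  rw [hfun]
  exact pvA_loop 1 n xs s acc h1 h2

-- B's recursion computes exactly the flipped-tail string
theorem pvRec_eq_tail (fi : Int) :
    ∀ (xs : List String), pvRec (pvEds fi) xs = pvTail fi (xs.map pvFlip) := by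
  intro xs
  induction xs with
  | nil => rfl
  | cons x xs ih =>
    cases xs with
    | nil => simp [pvRec, pvTail, pvFlip]
    | cons y ys =>
      rw [pvRec]
      simp only [List.isEmpty_cons, if_false, Bool.false_eq_true]
      rw [ih]
      cases ys with
      | nil => simp [pvTail, pvFlip]
      | cons z zs =>
        simp only [List.map, pvTail, List.length_cons, pvFlip]
        by_cases hc : PySem.Str.isIn "," x = true <;> simp [String.append_assoc]

-- ===== VERDICT (by name: the statement is the Claim_ definition above) =====
theorem reformat_namelist_spec : Claim_equal_reformat_namelist := by
  intro namelist _
  unfold Spec_reformat_namelist reformat_namelist reformat_namelist_alt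
  have hsep : (" and " : String).toList ≠ [] := by decide
  cases hE : PySem.Str.isIn "(Eds.)" namelist
  · simp only [Bool.false_eq_true, if_false]
    have hne := pvSplit_ne_nil namelist " and " hsep
    rw [pvA_loop 0 _ _ 0 "" hne (by simp)]
    rw [← pvRec_eq_tail 0 _]
    simp [pvEds]
  · simp only [if_true]
    have hne := pvSplit_ne_nil (((PySem.Str.split? namelist "(Eds.)").getD []).headD "") " and " hsep
    rw [pvA_loop1 _ _ 0 "" hne (by simp)]
    rw [← pvRec_eq_tail 1 _]
    simp [pvEds]
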